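-- pv_equiv track=rewrite | github.com/Peidon/aubot | bot/ml/text_processor.py | cluster_phrases
-- ===== SOURCE A (Python) =====
-- def tokenize(phrase):
--     """Extract meaningful words (ignore stop words for better clustering)"""
--     tokens = set(phrase.split())
--     return tokens - stop_words
--
-- def cluster_phrases(phrases):
--     """Group phrases by shared tokens"""
--     clusters = []
--     used = set()
--
--     for i, phrase in enumerate(phrases):
--         if i in used:
--             continue
--
--         tokens_i = tokenize(phrase)
--         cluster = [phrase]
--         used.add(i)
--
--         # Find similar phrases (share >50% of tokens)
--         for j, other_phrase in enumerate(phrases[i + 1:], start=i + 1):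
--             if j in used:
--                 continue
--
--             tokens_j = tokenize(other_phrase)
--             overlap = len(tokens_i & tokens_j)
--             min_size = min(len(tokens_i), len(tokens_j))
--
--             if overlap > 0 and overlap / min_size >= 0.5:
--                 cluster.append(other_phrase)
--                 used.add(j)
--
--         clusters.append(cluster)
--
--     return clusters
--
-- stop_words = {'a', 'an', 'the', 'is', 'or', 'of', 'in', 'to'}
-- ===== SOURCE B (Python) =====
-- stop_words = {'a', 'an', 'the', 'is', 'or', 'of', 'in', 'to'}
--
--
-- def tokenize(phrase):
--     """Extract meaningful words (ignore stop words for better clustering)"""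
--     return set(phrase.split()) - stop_words
--
--
-- def cluster_phrases(phrases):
--     """Group phrases by shared tokens, driven by an inverted index:
--     tokenize each phrase once, map every token to the ascending list of
--     phrase indices containing it, and for each seed visit only the
--     candidate indices that share at least one token with it."""
--     toks = [tokenize(p) for p in phrases]
--     index = {}
--     for j, ts in enumerate(toks):
--         for t in ts:
--             index[t] = index.get(t, []) + [j]
--
--     clusters = []
--     used = set()
--     for i, phrase in enumerate(phrases):
--         if i in used:
--             continue
--         used.add(i)
--         ti = toks[i]
--         cluster = [phrase]
--         cands = set()
--         for t in ti:
--             cands.update(index.get(t, []))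
--         for j in sorted(c for c in cands if c > i):
--             if j in used:
--                 continue
--             tj = toks[j]
--             overlap = len(ti & tj)
--             if overlap > 0 and 2 * overlap >= min(len(ti), len(tj)):
--                 cluster.append(phrases[j])
--                 used.add(j)
--         clusters.append(cluster)
--     return clusters
-- ===== Notes on version B (the rewrite author's own statement) =====
-- stated objective: faster
-- what changed: B tokenizes every phrase once and builds an inverted index from each token to the ascending list of phrase indices containing it; each seed then gathers, deduplicates and sorts only the indices sharing a token with it and applies the same overlap test to those candidates, instead of A's full rescan of all later phrases (re-tokenizing each) for every seed.
import Mathlib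
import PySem

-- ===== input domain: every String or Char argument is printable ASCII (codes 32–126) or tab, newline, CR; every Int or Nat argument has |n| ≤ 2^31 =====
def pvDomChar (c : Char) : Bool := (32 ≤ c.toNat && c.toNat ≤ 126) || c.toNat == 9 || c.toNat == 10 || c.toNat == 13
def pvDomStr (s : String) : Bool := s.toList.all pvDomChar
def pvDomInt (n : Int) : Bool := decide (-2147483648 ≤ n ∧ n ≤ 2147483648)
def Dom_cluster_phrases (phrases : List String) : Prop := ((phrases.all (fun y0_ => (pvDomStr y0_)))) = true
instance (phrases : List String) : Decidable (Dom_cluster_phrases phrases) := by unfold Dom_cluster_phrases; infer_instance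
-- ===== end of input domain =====

-- B replaces A's full pairwise scan by an inverted index (token -> ascending phrase
-- indices): each phrase is tokenized once and each seed visits only the candidate
-- indices sharing a token with it (objective: faster).

-- ===== PORT A =====
-- stop_words (module constant, shared by both versions' tokenize)
def stopWords : PySem.Set String :=
  PySem.Set.ofList ["a", "an", "the", "is", "or", "of", "in", "to"]

-- tokenize (module helper, identical in A and B)
def tokenize (phrase : String) : PySem.Set String :=
  PySem.Set.diff (PySem.Set.ofList (PySem.Str.split₀ phrase)) stopWords

-- A's inner loop: 'for j, other_phrase in enumerate(phrases[i+1:], start=i+1)' over the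
-- tail of the enumerated list; 'overlap / min_size >= 0.5' is ported exactly as
-- 'min_size ≤ 2 * overlap' (equivalent integer form of the float comparison).
def innerA (ti : PySem.Set String) :
    List (Int × String) → PySem.Set Int → List String → List String × PySem.Set Int
  | [], used, cluster => (cluster, used)
  | (j, q) :: rest, used, cluster =>
    if PySem.Set.contains used j then innerA ti rest used cluster
    else
      let tj := tokenize q
      let overlap := (PySem.Set.inter ti tj).length
      let minSize := min ti.length tj.length
      if 0 < overlap ∧ minSize ≤ 2 * overlap then
        innerA ti rest (PySem.Set.add used j) (cluster ++ [q])
      else innerA ti rest used cluster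

-- A's outer loop: 'for i, phrase in enumerate(phrases)' with the 'used' index set
def outerA : List (Int × String) → PySem.Set Int → List (List String) → List (List String)
  | [], _, clusters => clusters
  | (i, p) :: rest, used, clusters =>
    if PySem.Set.contains used i then outerA rest used clusters
    else
      let ti := tokenize p
      let r := innerA ti rest (PySem.Set.add used i) [p]
      outerA rest r.2 (clusters ++ [r.1])

def cluster_phrases (phrases : List String) : List (List String) :=
  outerA (PySem.List.enumerate phrases 0) PySem.Set.empty []

-- ===== PORT B =====
-- 'index[t] = index.get(t, []) + [j]' for every token t of every phrase j
def buildIndex (toks : List (PySem.Set String)) : PySem.Dict String (List Int) :=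
  (PySem.List.enumerate toks 0).foldl
    (fun d e => e.2.foldl (fun d t => d.modify t [] (· ++ [e.1])) d)
    PySem.Dict.empty

-- 'cands = set(); for t in ti: cands.update(index.get(t, []))'
def gather (index : PySem.Dict String (List Int)) (ti : PySem.Set String) : PySem.Set Int :=
  ti.foldl (fun c t => PySem.Set.update c (index.getD t [])) PySem.Set.empty

-- B's inner loop over the sorted candidate indices, looking phrases/token sets up by index
def innerB (phrases : List String) (toks : List (PySem.Set String)) (ti : PySem.Set String) :
    List Int → PySem.Set Int → List String → List String × PySem.Set Int
  | [], used, cluster => (cluster, used)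
  | j :: rest, used, cluster =>
    if PySem.Set.contains used j then innerB phrases toks ti rest used cluster
    else
      let tj := PySem.List.pyGetD toks j []
      let overlap := (PySem.Set.inter ti tj).length
      if 0 < overlap ∧ min ti.length tj.length ≤ 2 * overlap then
        innerB phrases toks ti rest (PySem.Set.add used j)
          (cluster ++ [PySem.List.pyGetD phrases j ""])
      else innerB phrases toks ti rest used cluster

-- B's outer loop: same seed order, but candidates come from the inverted index
def outerB (phrases : List String) (toks : List (PySem.Set String))
    (index : PySem.Dict String (List Int)) :
    List (Int × String) → PySem.Set Int → List (List String) → List (List String)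
  | [], _, clusters => clusters
  | (i, p) :: rest, used, clusters =>
    if PySem.Set.contains used i then outerB phrases toks index rest used clusters
    else
      let ti := PySem.List.pyGetD toks i []
      let cands := PySem.List.sorted
        (((gather index ti) : List Int).filter (fun c => decide (i < c))) (fun x => x) false
      let r := innerB phrases toks ti cands (PySem.Set.add used i) [p]
      outerB phrases toks index rest r.2 (clusters ++ [r.1])

def cluster_phrases_alt (phrases : List String) : List (List String) :=
  let toks := phrases.map tokenize
  outerB phrases toks (buildIndex toks) (PySem.List.enumerate phrases 0) PySem.Set.empty []

-- ===== PRECONDITION & SPEC =====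
def Spec_cluster_phrases (phrases : List String) (out : List (List String)) : Prop := out = cluster_phrases_alt phrases
instance (phrases : List String) (out : List (List String)) : Decidable (Spec_cluster_phrases phrases out) := by unfold Spec_cluster_phrases; infer_instance

-- ===== CLAIM (what is proved, stated in full; the proofs are below) =====
def Claim_equal_cluster_phrases : Prop := ∀ (phrases : List String), Dom_cluster_phrases phrases → Spec_cluster_phrases phrases (cluster_phrases phrases)

-- ===== LEMMAS AND PROOFS =====

-- the decidable similarity test both inner loops apply
def simTest (ti tj : PySem.Set String) : Bool :=
  decide (0 < (PySem.Set.inter ti tj).length ∧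
    min ti.length tj.length ≤ 2 * (PySem.Set.inter ti tj).length)

theorem pv_contains_append_single (s : PySem.Set Int) (j x : Int) (hx : x ≠ j) :
    PySem.Set.contains (s ++ [j]) x = PySem.Set.contains s x := by
  apply Bool.eq_iff_iff.mpr; simp [hx]

-- closed form of A's inner loop
theorem innerA_spec (ti : PySem.Set String) :
    ∀ (rem : List (Int × String)) (used : PySem.Set Int) (cluster : List String),
      (rem.map Prod.fst).Nodup →
      innerA ti rem used cluster =
        (cluster ++ (rem.filter (fun e =>
            !PySem.Set.contains used e.1 && simTest ti (tokenize e.2))).map Prod.snd,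
         used ++ (rem.filter (fun e =>
            !PySem.Set.contains used e.1 && simTest ti (tokenize e.2))).map Prod.fst) := by
  intro rem
  induction rem with
  | nil => intro used cluster _; simp [innerA]
  | cons e rest ih =>
    obtain ⟨j, q⟩ := e
    intro used cluster hnd
    simp only [List.map_cons, List.nodup_cons, List.mem_map] at hnd
    obtain ⟨hj, hnd'⟩ := hnd
    have hne : ∀ e ∈ rest, e.1 ≠ j := fun e he h => hj ⟨e, he, h⟩
    cases hc : PySem.Set.contains used j with
    | true =>
      simp only [innerA, hc, if_true]
      rw [ih used cluster hnd']
      have hm : j ∈ used := (PySem.Set.contains_iff used j).mp hc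
      simp [hm]
    | false =>
      simp only [innerA, hc, Bool.false_eq_true, if_false]
      by_cases hs : 0 < (PySem.Set.inter ti (tokenize q)).length ∧
          min ti.length (tokenize q).length ≤ 2 * (PySem.Set.inter ti (tokenize q)).length
      · have hsim : simTest ti (tokenize q) = true := by
          simp only [simTest]; exact decide_eq_true hs
        have hmem : j ∉ used := by
          intro hm
          rw [(PySem.Set.contains_iff used j).mpr hm] at hc
          simp at hc
        have hadd : PySem.Set.add used j = used ++ [j] := PySem.Set.add_of_not_mem hmem
        rw [if_pos hs, hadd, ih (used ++ [j]) (cluster ++ [q]) hnd']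
        have hfc : rest.filter (fun e =>
              !PySem.Set.contains (used ++ [j]) e.1 && simTest ti (tokenize e.2))
            = rest.filter (fun e =>
              !PySem.Set.contains used e.1 && simTest ti (tokenize e.2)) :=
          List.filter_congr (fun e he => by
            rw [pv_contains_append_single used j e.1 (hne e he)])
        rw [hfc]
        simp [hmem, hsim]
      · have hsim : simTest ti (tokenize q) = false := by
          simp only [simTest]; exact decide_eq_false hs
        rw [if_neg hs, ih used cluster hnd']
        simp [hsim]

-- closed form of B's inner loop
theorem innerB_spec (phrases : List String) (toks : List (PySem.Set String)) (ti : PySem.Set String) :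
    ∀ (js : List Int) (used : PySem.Set Int) (cluster : List String),
      js.Nodup →
      innerB phrases toks ti js used cluster =
        (cluster ++ (js.filter (fun j =>
            !PySem.Set.contains used j && simTest ti (PySem.List.pyGetD toks j []))).map
            (fun j => PySem.List.pyGetD phrases j ""),
         used ++ js.filter (fun j =>
            !PySem.Set.contains used j && simTest ti (PySem.List.pyGetD toks j []))) := by
  intro js
  induction js with
  | nil => intro used cluster _; simp [innerB]
  | cons j rest ih =>
    intro used cluster hnd
    simp only [List.nodup_cons] at hnd
    obtain ⟨hj, hnd'⟩ := hnd
    cases hc : PySem.Set.contains used j with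
    | true =>
      simp only [innerB, hc, if_true]
      rw [ih used cluster hnd']
      have hm : j ∈ used := (PySem.Set.contains_iff used j).mp hc
      simp [hm]
    | false =>
      simp only [innerB, hc, Bool.false_eq_true, if_false]
      by_cases hs : 0 < (PySem.Set.inter ti (PySem.List.pyGetD toks j [])).length ∧
          min ti.length (PySem.List.pyGetD toks j []).length ≤
            2 * (PySem.Set.inter ti (PySem.List.pyGetD toks j [])).length
      · have hsim : simTest ti (PySem.List.pyGetD toks j []) = true := by
          simp only [simTest]; exact decide_eq_true hs
        have hmem : j ∉ used := by
          intro hm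
          rw [(PySem.Set.contains_iff used j).mpr hm] at hc
          simp at hc
        have hadd : PySem.Set.add used j = used ++ [j] := PySem.Set.add_of_not_mem hmem
        rw [if_pos hs, hadd, ih (used ++ [j]) (cluster ++ [PySem.List.pyGetD phrases j ""]) hnd']
        have hfc : rest.filter (fun j' =>
              !PySem.Set.contains (used ++ [j]) j' && simTest ti (PySem.List.pyGetD toks j' []))
            = rest.filter (fun j' =>
              !PySem.Set.contains used j' && simTest ti (PySem.List.pyGetD toks j' [])) :=
          List.filter_congr (fun j' hj' => by
            rw [pv_contains_append_single used j j' (fun h => hj (h ▸ hj'))])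
        rw [hfc]
        simp [hmem, hsim]
      · have hsim : simTest ti (PySem.List.pyGetD toks j []) = false := by
          simp only [simTest]; exact decide_eq_false hs
        rw [if_neg hs, ih used cluster hnd']
        simp [hsim]

-- membership through the nested index-building fold
theorem mem_getD_build (l : List (Int × PySem.Set String)) (d : PySem.Dict String (List Int))
    (t : String) (j : Int) :
    j ∈ (l.foldl (fun d e => e.2.foldl (fun d t' => d.modify t' [] (· ++ [e.1])) d) d).getD t []
      ↔ j ∈ d.getD t [] ∨ ∃ e ∈ l, t ∈ e.2 ∧ j = e.1 := by
  induction l generalizing d with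
  | nil => simp
  | cons e rest ih =>
    simp only [List.foldl_cons]
    rw [ih]
    have hstep : (e.2.foldl (fun d t' => d.modify t' [] (· ++ [e.1])) d).getD t []
        = d.getD t [] ++ (e.2.filter (fun t' => t' == t)).map (fun _ => e.1) := by
      rw [← List.foldl_map (f := fun t' => (t', e.1))
        (g := fun (d : PySem.Dict String (List Int)) p => d.modify p.1 [] (· ++ [p.2])),
        PySem.Dict.getD_foldl_modify_append]
      rw [List.filter_map, List.map_map]
      rfl
    rw [hstep]
    simp only [List.mem_append, List.mem_map, List.mem_filter, List.mem_cons, beq_iff_eq]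
    constructor
    · rintro ((h | ⟨a, ⟨ha, rfl⟩, rfl⟩) | ⟨e', he', h2, h3⟩)
      · exact Or.inl h
      · exact Or.inr ⟨e, Or.inl rfl, ha, rfl⟩
      · exact Or.inr ⟨e', Or.inr he', h2, h3⟩
    · rintro (h | ⟨e', (rfl | he'), h2, h3⟩)
      · exact Or.inl (Or.inl h)
      · exact Or.inl (Or.inr ⟨t, ⟨h2, rfl⟩, h3.symm ▸ rfl⟩)
      · exact Or.inr ⟨e', he', h2, h3⟩

-- membership in the inverted index
theorem mem_buildIndex (toks : List (PySem.Set String)) (t : String) (j : Int) :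
    j ∈ (buildIndex toks).getD t [] ↔
      ∃ k : Nat, ∃ h : k < toks.length, j = (k : Int) ∧ t ∈ toks[k] := by
  unfold buildIndex
  rw [mem_getD_build]
  simp only [PySem.Dict.getD_empty, List.not_mem_nil, false_or]
  constructor
  · rintro ⟨e, he, h2, h3⟩
    obtain ⟨k, hk, rfl⟩ := (PySem.List.mem_enumerate_iff toks 0 e).mp he
    exact ⟨k, hk, by simpa using h3, by simpa using h2⟩
  · rintro ⟨k, hk, rfl, htk⟩
    refine ⟨((k : Int), toks[k]), ?_, htk, rfl⟩
    exact (PySem.List.mem_enumerate_iff toks 0 _).mpr ⟨k, hk, by simp⟩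

-- membership in the gathered candidate set
theorem mem_gather_aux (index : PySem.Dict String (List Int)) :
    ∀ (ts : List String) (c : PySem.Set Int) (j : Int),
      j ∈ ts.foldl (fun c t => PySem.Set.update c (index.getD t [])) c ↔
        j ∈ c ∨ ∃ t ∈ ts, j ∈ index.getD t [] := by
  intro ts
  induction ts with
  | nil => simp
  | cons t rest ih =>
    intro c j
    simp only [List.foldl_cons, ih, PySem.Set.mem_update, List.mem_cons]
    constructor
    · rintro ((h | h) | ⟨t', ht', h2⟩)
      · exact Or.inl h
      · exact Or.inr ⟨t, Or.inl rfl, h⟩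
      · exact Or.inr ⟨t', Or.inr ht', h2⟩
    · rintro (h | ⟨t', (rfl | ht'), h2⟩)
      · exact Or.inl (Or.inl h)
      · exact Or.inl (Or.inr h2)
      · exact Or.inr ⟨t', ht', h2⟩

theorem mem_gather (index : PySem.Dict String (List Int)) (ti : PySem.Set String) (j : Int) :
    j ∈ gather index ti ↔ ∃ t ∈ ti, j ∈ index.getD t [] := by
  unfold gather
  rw [mem_gather_aux]
  simp [PySem.Set.empty]

theorem nodup_gather (index : PySem.Dict String (List Int)) (ti : PySem.Set String) :
    (gather index ti : List Int).Nodup := by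
  unfold gather
  have : ∀ (ts : List String) (c : PySem.Set Int), c.Nodup →
      (ts.foldl (fun c t => PySem.Set.update c (index.getD t [])) c).Nodup := by
    intro ts
    induction ts with
    | nil => intro c hc; exact hc
    | cons t rest ih =>
      intro c hc
      exact ih _ (PySem.Set.nodup_update c _ hc)
  exact this ti PySem.Set.empty List.nodup_nil

-- the token set of phrase j, for an in-range index
theorem tokAt (phrases : List String) (j : Int) (h0 : 0 ≤ j) (hj : j < (phrases.length : Int)) :
    PySem.List.pyGetD (phrases.map tokenize) j [] = tokenize (PySem.List.pyGetD phrases j "") := by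
  rw [PySem.List.pyGetD_eq_getElem _ _ h0 (by simpa using hj),
      PySem.List.pyGetD_eq_getElem _ _ h0 hj]
  simp

-- the sorted candidate list IS the ascending list of overlapping indices > i
theorem cands_eq (phrases : List String) (toks : List (PySem.Set String))
    (htoks : toks = phrases.map tokenize) (i : Int) (hi : 0 ≤ i) (ti : PySem.Set String) :
    PySem.List.sorted
        (((gather (buildIndex toks) ti) : List Int).filter (fun c => decide (i < c))) (fun x => x) false
      = (PySem.List.pyRange (i+1) (phrases.length : Int) 1).filter
          (fun j => 0 < (PySem.Set.inter ti (PySem.List.pyGetD toks j [])).length) := by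
  have hn : toks.length = phrases.length := by rw [htoks]; simp
  apply PySem.List.sorted_eq_of_perm_of_pairwise_lt
  · rw [List.perm_ext_iff_of_nodup
      (List.Nodup.filter _ (PySem.List.nodup_pyRange_one _ _))
      (List.Nodup.filter _ (nodup_gather _ _))]
    intro j
    simp only [List.mem_filter, PySem.List.mem_pyRange_one, mem_gather, mem_buildIndex,
      decide_eq_true_eq]
    constructor
    · rintro ⟨⟨h1, h2⟩, hov⟩
      have h0 : 0 ≤ j := by omega
      have hjn : j.toNat < toks.length := by omega
      have hget : PySem.List.pyGetD toks j [] = toks[j.toNat] :=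
        PySem.List.pyGetD_eq_getElem _ _ h0 (by omega)
      rw [hget] at hov
      have hne : PySem.Set.inter ti toks[j.toNat] ≠ [] := by
        intro h; rw [h] at hov; simp at hov
      obtain ⟨t, ht⟩ := List.exists_mem_of_ne_nil _ hne
      obtain ⟨hti, htj⟩ := (PySem.Set.mem_inter ti _ t).mp ht
      exact ⟨⟨t, hti, j.toNat, hjn, by omega, htj⟩, by omega⟩
    · rintro ⟨⟨t, hti, k, hk, rfl, htk⟩, hij⟩
      have hget : PySem.List.pyGetD toks (k : Int) [] = toks[k] := by
        rw [PySem.List.pyGetD_eq_getElem _ _ (by positivity) (by exact_mod_cast hk)]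
        simp
      refine ⟨⟨by omega, by exact_mod_cast hn ▸ hk⟩, ?_⟩
      rw [hget]
      exact List.length_pos_of_mem ((PySem.Set.mem_inter ti toks[k] t).mpr ⟨hti, htk⟩)
  · exact List.Pairwise.filter _ (PySem.List.pairwise_lt_pyRange_one _ _)

-- the two inner loops agree when A scans the tail and B scans the sorted candidates
theorem inner_bridge (phrases : List String) (toks : List (PySem.Set String))
    (htoks : toks = phrases.map tokenize) (k : Nat) (hk : k < phrases.length)
    (used : PySem.Set Int) (cluster : List String) :
    innerA (PySem.List.pyGetD toks (k : Int) [])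
        ((PySem.List.enumerate phrases 0).drop (k+1)) used cluster
      = innerB phrases toks (PySem.List.pyGetD toks (k : Int) [])
          (PySem.List.sorted
            (((gather (buildIndex toks) (PySem.List.pyGetD toks (k : Int) [])) : List Int).filter
              (fun c => decide ((k : Int) < c))) (fun x => x) false)
          used cluster := by
  set ti := PySem.List.pyGetD toks (k : Int) [] with hti
  set n := (phrases.length : Int) with hnn
  set g : Int → Int × String := fun j => (j, PySem.List.pyGetD phrases j "") with hg
  have hrem : (PySem.List.enumerate phrases 0).drop (k+1)
      = (PySem.List.pyRange ((k : Int)+1) n 1).map g := by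
    rw [show PySem.List.enumerate phrases 0 = PySem.List.enumerate phrases from rfl]
    rw [PySem.List.enumerate_eq_map_pyRange phrases ""]
    have hlen : PySem.List.len phrases = n := by simp [hnn]
    rw [hlen]
    rw [PySem.List.pyRange_one_append 0 ((k : Int)+1) n (by omega) (by omega)]
    rw [List.map_append]
    have hl1 : ((PySem.List.pyRange 0 ((k : Int)+1) 1).map g).length = k + 1 := by
      rw [List.length_map, PySem.List.length_pyRange_one]
      omega
    rw [← hl1, List.drop_left]
  rw [cands_eq phrases toks htoks (k : Int) (by positivity) ti, hrem]
  have hnodA : (((PySem.List.pyRange ((k : Int)+1) n 1).map g).map Prod.fst).Nodup := by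
    have : ((PySem.List.pyRange ((k : Int)+1) n 1).map g).map Prod.fst
        = PySem.List.pyRange ((k : Int)+1) n 1 := by
      simp [List.map_map, hg, Function.comp_def]
    rw [this]
    exact PySem.List.nodup_pyRange_one _ _
  have hnodB : ((PySem.List.pyRange ((k : Int)+1) n 1).filter
      (fun j => 0 < (PySem.Set.inter ti (PySem.List.pyGetD toks j [])).length)).Nodup :=
    List.Nodup.filter _ (PySem.List.nodup_pyRange_one _ _)
  rw [innerA_spec ti _ used cluster hnodA, innerB_spec phrases toks ti _ used cluster hnodB]
  -- both filtered lists are the same list of indices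
  have hAfilt : (((PySem.List.pyRange ((k : Int)+1) n 1).map g).filter (fun e =>
        !PySem.Set.contains used e.1 && simTest ti (tokenize e.2)))
      = ((PySem.List.pyRange ((k : Int)+1) n 1).filter (fun j =>
          !PySem.Set.contains used j && simTest ti (PySem.List.pyGetD toks j []))).map g := by
    rw [List.filter_map]
    congr 1
    refine List.filter_congr (fun j hj => ?_)
    obtain ⟨h1, h2⟩ := PySem.List.mem_pyRange_one.mp hj
    have htok : tokenize (PySem.List.pyGetD phrases j "") = PySem.List.pyGetD toks j [] := by
      rw [htoks, tokAt phrases j (by omega) h2]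
    simp [hg, htok]
  have hBfilt : (((PySem.List.pyRange ((k : Int)+1) n 1).filter
        (fun j => 0 < (PySem.Set.inter ti (PySem.List.pyGetD toks j [])).length)).filter (fun j =>
          !PySem.Set.contains used j && simTest ti (PySem.List.pyGetD toks j [])))
      = (PySem.List.pyRange ((k : Int)+1) n 1).filter (fun j =>
          !PySem.Set.contains used j && simTest ti (PySem.List.pyGetD toks j [])) := by
    rw [List.filter_filter]
    refine List.filter_congr (fun j _ => ?_)
    cases hsim : simTest ti (PySem.List.pyGetD toks j []) with
    | false => simp
    | true =>
      have hov : 0 < (PySem.Set.inter ti (PySem.List.pyGetD toks j [])).length :=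
        (of_decide_eq_true hsim).1
      simp [hov]
  rw [hAfilt, hBfilt]
  simp [List.map_map, hg, Function.comp_def]

-- the two outer loops agree on every suffix of the enumerated list
theorem outer_bridge (phrases : List String) (toks : List (PySem.Set String))
    (htoks : toks = phrases.map tokenize) :
    ∀ (suffix : List (Int × String)) (k : Nat) (used : PySem.Set Int) (acc : List (List String)),
      suffix = (PySem.List.enumerate phrases 0).drop k →
      outerA suffix used acc = outerB phrases toks (buildIndex toks) suffix used acc := by
  intro suffix
  induction suffix with
  | nil => intro k used acc _; simp [outerA, outerB]
  | cons e rest ih =>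
    obtain ⟨i, p⟩ := e
    intro k used acc hsfx
    have hkE : k < (PySem.List.enumerate phrases 0).length := by
      by_contra h
      rw [List.drop_eq_nil_of_le (le_of_not_gt h)] at hsfx
      exact List.cons_ne_nil _ _ hsfx
    have hk : k < phrases.length := by
      rwa [PySem.List.length_enumerate] at hkE
    rw [List.drop_eq_getElem_cons hkE, PySem.List.getElem_enumerate] at hsfx
    have hi : i = (k : Int) := by
      have := (List.cons.injEq _ _ _ _).mp hsfx
      have h1 := this.1
      simp only [Prod.mk.injEq] at h1
      omega
    have hp : p = phrases[k] := by
      have := (List.cons.injEq _ _ _ _).mp hsfx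
      have h1 := this.1
      simp only [Prod.mk.injEq] at h1
      exact h1.2
    have hrest : rest = (PySem.List.enumerate phrases 0).drop (k+1) :=
      ((List.cons.injEq _ _ _ _).mp hsfx).2
    have htip : PySem.List.pyGetD toks (k : Int) [] = tokenize p := by
      rw [htoks, tokAt phrases (k : Int) (by positivity) (by exact_mod_cast hk), hp]
      congr 1
      rw [PySem.List.pyGetD_eq_getElem _ _ (by positivity) (by exact_mod_cast hk)]
      simp
    subst hi
    cases hc : PySem.Set.contains used ((k : Nat) : Int) with
    | true =>
      simp only [outerA, outerB, hc, if_true]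
      exact ih (k+1) used acc hrest
    | false =>
      simp only [outerA, outerB, hc, Bool.false_eq_true, if_false]
      have hinner := inner_bridge phrases toks htoks k hk
        (PySem.Set.add used ((k : Nat) : Int)) [p]
      rw [← hrest] at hinner
      rw [htip] at hinner ⊢
      rw [hinner]
      exact ih (k+1) _ _ hrest

-- ===== VERDICT (by name: the statement is the Claim_ definition above) =====
theorem cluster_phrases_spec : Claim_equal_cluster_phrases := by
  intro phrases _
  unfold Spec_cluster_phrases cluster_phrases cluster_phrases_alt
  exact outer_bridge phrases (phrases.map tokenize) rfl
    (PySem.List.enumerate phrases 0) 0 PySem.Set.empty [] (by simp)
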